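-- pv_equiv track=rewrite | github.com/rmshimomura/RSA-Cryptography-MPrime | functions.py | findE
-- ===== SOURCE A (Python) =====
-- import math
--
-- def phiN(primes, numOfPrimes):
--     aux = 1
--     for i in range(numOfPrimes):
--         aux *= (primes[i] - 1)
--     return int(aux)
--
-- def findE(primes, numOfPrimes):
--     count = 2
--     while True:
--         if(math.gcd(count, phiN(primes, numOfPrimes)) == 1):
--             break
--         else:
--             count = count + 1
--     return int(count)
-- ===== SOURCE B (Python) =====
-- import math
--
-- def findE(primes, numOfPrimes):
--     # Factor-by-factor coprimality: count is coprime to the totient product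
--     # iff it is coprime to every (p-1); no big product is ever formed.
--     count = 2
--     while not all(math.gcd(count, primes[i] - 1) == 1 for i in range(numOfPrimes)):
--         count += 1
--     return count
-- ===== Notes on version B (the rewrite author's own statement) =====
-- stated objective: alternative
-- what changed: B never forms the totient product phiN: it tests each candidate for coprimality factor-by-factor (gcd with every primes[i]-1) using the identity that an integer is coprime to a product iff it is coprime to every factor, so the big-product multiplication loop per candidate disappears.
-- outside the precondition, e.g. on findE([3, 5], 3): A raises IndexError, B raises IndexError
import Mathlib
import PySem

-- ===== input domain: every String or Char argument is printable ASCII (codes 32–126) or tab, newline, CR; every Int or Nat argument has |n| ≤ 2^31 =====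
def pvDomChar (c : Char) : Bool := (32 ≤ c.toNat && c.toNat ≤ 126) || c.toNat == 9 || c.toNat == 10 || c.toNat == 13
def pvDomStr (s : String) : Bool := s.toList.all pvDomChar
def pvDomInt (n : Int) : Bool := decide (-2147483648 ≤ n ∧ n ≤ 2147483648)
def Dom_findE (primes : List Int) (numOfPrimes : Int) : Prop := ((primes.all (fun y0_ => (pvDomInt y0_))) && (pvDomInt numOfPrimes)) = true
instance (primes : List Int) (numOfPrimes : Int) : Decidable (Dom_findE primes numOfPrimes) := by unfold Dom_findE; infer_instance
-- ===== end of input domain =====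

set_option maxRecDepth 8000

-- B replaces A's 'one gcd against the big totient product' test by a per-factor
-- coprimality test (coprime to a product iff coprime to each factor); objective: alternative.

-- ===== PORT A =====
-- phiN: aux = 1; for i in range(numOfPrimes): aux *= primes[i] - 1.  none = IndexError.
def phiN (primes : List Int) (numOfPrimes : Int) : Option Int :=
  (PySem.List.pyRange 0 numOfPrimes 1).foldl
    (fun acc i =>
      match acc, PySem.List.pyGet? primes i with
      | some a, some p => some (a * (p - 1))
      | _, _ => none)
    (some 1)

-- the while-loop of A; fuel is only a termination guard (inside Pre_ it never runs out)
def findELoopA (primes : List Int) (numOfPrimes : Int) (count : Int) : Nat → Int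
  | 0 => count
  | fuel + 1 =>
    match phiN primes numOfPrimes with
    | some phi =>
        if Int.gcd count phi = 1 then count
        else findELoopA primes numOfPrimes (count + 1) fuel
    | none => count   -- IndexError inside the loop: outside Pre_

def findE (primes : List Int) (numOfPrimes : Int) : Int :=
  findELoopA primes numOfPrimes 2
    (match phiN primes numOfPrimes with
     | some phi => phi.natAbs + 2
     | none => 1)

-- ===== PORT B =====
-- all(math.gcd(count, primes[i] - 1) == 1 for i in range(numOfPrimes)); false on IndexError (outside Pre_)
def allCoprime (primes : List Int) (numOfPrimes : Int) (count : Int) : Bool :=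
  (PySem.List.pyRange 0 numOfPrimes 1).all fun i =>
    match PySem.List.pyGet? primes i with
    | some p => Int.gcd count (p - 1) == 1
    | none => false

def findELoopB (primes : List Int) (numOfPrimes : Int) (count : Int) : Nat → Int
  | 0 => count
  | fuel + 1 =>
    if allCoprime primes numOfPrimes count then count
    else findELoopB primes numOfPrimes (count + 1) fuel

-- fuel: product of the |primes[i]-1| plus 2 — a termination guard only
def fuelB (primes : List Int) (numOfPrimes : Int) : Nat :=
  (PySem.List.pyRange 0 numOfPrimes 1).foldl
    (fun acc i =>
      match PySem.List.pyGet? primes i with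
      | some p => acc * (p - 1).natAbs
      | none => 0)
    1 + 2

def findE_alt (primes : List Int) (numOfPrimes : Int) : Int :=
  findELoopB primes numOfPrimes 2 (fuelB primes numOfPrimes)

-- ===== PRECONDITION & SPEC =====
-- Pre_ excludes numOfPrimes > len(primes) (A raises IndexError) and a 1 among the
-- first numOfPrimes entries (the totient product is 0 and A loops forever).
def Pre_findE (primes : List Int) (numOfPrimes : Int) : Prop :=
  numOfPrimes ≤ (primes.length : Int) ∧ (1 : Int) ∉ primes.take numOfPrimes.toNat
instance (primes : List Int) (numOfPrimes : Int) : Decidable (Pre_findE primes numOfPrimes) := by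
  unfold Pre_findE; infer_instance

def pvWitness_findE : List Int × Int := ([3, 5], 2)

def Spec_findE (primes : List Int) (numOfPrimes : Int) (out : Int) : Prop := out = findE_alt primes numOfPrimes
instance (primes : List Int) (numOfPrimes : Int) (out : Int) : Decidable (Spec_findE primes numOfPrimes out) := by unfold Spec_findE; infer_instance

-- ===== CLAIM (what is proved, stated in full; the proofs are below) =====
def Claim_equal_findE : Prop := ∀ (primes : List Int) (numOfPrimes : Int), Dom_findE primes numOfPrimes → Pre_findE primes numOfPrimes → Spec_findE primes numOfPrimes (findE primes numOfPrimes)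

-- ===== LEMMAS AND PROOFS =====

-- the totient product over the first k entries
def prodF (l : List Int) : Int := (l.map (fun p => p - 1)).prod

theorem phiN_eq_prodF (primes : List Int) (k : Nat) (hk : k ≤ primes.length) :
    phiN primes (k : Int) = some (prodF (primes.take k)) := by
  induction k with
  | zero => simp [phiN, prodF]
  | succ m ih =>
    have hm : m ≤ primes.length := Nat.le_of_succ_le hk
    have hmlt : m < primes.length := hk
    have hr : PySem.List.pyRange 0 ((m : Int) + 1) 1
        = PySem.List.pyRange 0 (m : Int) 1 ++ [(m : Int)] :=
      PySem.List.pyRange_one_succ_right (by positivity)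
    have := ih hm
    simp only [phiN] at this ⊢
    push_cast
    rw [hr, List.foldl_append, this]
    simp only [List.foldl_cons, List.foldl_nil, PySem.List.pyGet?_natCast,
      List.getElem?_eq_getElem hmlt]
    have htk : List.take (m + 1) primes = List.take m primes ++ [primes[m]] := by
      rw [List.take_succ, List.getElem?_eq_getElem hmlt]; rfl
    rw [htk]
    simp only [prodF, Option.some.injEq, List.map_append, List.prod_append,
      List.map_cons, List.map_nil, List.prod_cons, List.prod_nil, mul_one]

theorem allCoprime_eq_all (primes : List Int) (k : Nat) (hk : k ≤ primes.length) (c : Int) :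
    allCoprime primes (k : Int) c
      = (primes.take k).all (fun p => Int.gcd c (p - 1) == 1) := by
  induction k with
  | zero => simp [allCoprime]
  | succ m ih =>
    have hm : m ≤ primes.length := Nat.le_of_succ_le hk
    have hmlt : m < primes.length := hk
    have hr : PySem.List.pyRange 0 ((m : Int) + 1) 1
        = PySem.List.pyRange 0 (m : Int) 1 ++ [(m : Int)] :=
      PySem.List.pyRange_one_succ_right (by positivity)
    have := ih hm
    simp only [allCoprime] at this ⊢
    push_cast
    rw [hr, List.all_append, this]
    simp only [List.all_cons, List.all_nil, PySem.List.pyGet?_natCast,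
      List.getElem?_eq_getElem hmlt]
    have htk : List.take (m + 1) primes = List.take m primes ++ [primes[m]] := by
      rw [List.take_succ, List.getElem?_eq_getElem hmlt]; rfl
    rw [htk, List.all_append, List.all_cons, List.all_nil, Bool.and_true]

-- coprime to a product iff coprime to each factor
theorem gcd_prodF_eq_one_iff (c : Int) (l : List Int) :
    (Int.gcd c (prodF l) = 1) ↔ (l.all (fun p => Int.gcd c (p - 1) == 1) = true) := by
  induction l with
  | nil => simp [prodF, Int.gcd]
  | cons x xs ih =>
    have : prodF (x :: xs) = (x - 1) * prodF xs := by simp [prodF]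
    rw [this]
    unfold Int.gcd at *
    rw [Int.natAbs_mul]
    have h := Nat.coprime_mul_iff_right (k := c.natAbs)
      (m := (x - 1).natAbs) (n := (prodF xs).natAbs)
    simp only [Nat.Coprime] at h
    rw [h]
    simp [ih]

-- the two loops agree once the two per-count tests agree
theorem loops_eq (primes : List Int) (n : Int) (phi : Int)
    (hφ : phiN primes n = some phi)
    (hall : ∀ c : Int, (Int.gcd c phi = 1) ↔ (allCoprime primes n c = true)) :
    ∀ (fuel : Nat) (count : Int),
      findELoopA primes n count fuel = findELoopB primes n count fuel := by
  intro fuel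
  induction fuel with
  | zero => intro count; rfl
  | succ m ih =>
    intro count
    simp only [findELoopA, findELoopB, hφ]
    by_cases h : Int.gcd count phi = 1
    · rw [if_pos h, if_pos ((hall count).mp h)]
    · rw [if_neg h, if_neg (fun hb => h ((hall count).mpr hb)), ih]

-- |prodF| equals fuelB's product of the |primes[i]-1|
theorem fuelB_eq (primes : List Int) (k : Nat) (hk : k ≤ primes.length) :
    fuelB primes (k : Int) = (prodF (primes.take k)).natAbs + 2 := by
  induction k with
  | zero => simp [fuelB, prodF]
  | succ m ih =>
    have hm : m ≤ primes.length := Nat.le_of_succ_le hk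
    have hmlt : m < primes.length := hk
    have hr : PySem.List.pyRange 0 ((m : Int) + 1) 1
        = PySem.List.pyRange 0 (m : Int) 1 ++ [(m : Int)] :=
      PySem.List.pyRange_one_succ_right (by positivity)
    have := ih hm
    simp only [fuelB] at this ⊢
    push_cast
    have this' : List.foldl
        (fun acc i =>
          match PySem.List.pyGet? primes i with
          | some p => acc * (p - 1).natAbs
          | none => 0)
        1 (PySem.List.pyRange 0 (m : Int) 1) = (prodF (List.take m primes)).natAbs := by
      omega
    rw [hr, List.foldl_append, this']
    simp only [List.foldl_cons, List.foldl_nil, PySem.List.pyGet?_natCast,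
      List.getElem?_eq_getElem hmlt]
    have htk : List.take (m + 1) primes = List.take m primes ++ [primes[m]] := by
      rw [List.take_succ, List.getElem?_eq_getElem hmlt]; rfl
    rw [htk]
    simp only [prodF, List.map_append, List.prod_append, List.map_cons,
      List.map_nil, List.prod_cons, List.prod_nil, mul_one, Int.natAbs_mul]

-- ===== VERDICT (by name: the statement is the Claim_ definition above) =====
theorem findE_spec : Claim_equal_findE := by
  intro primes n _hDom hPre
  obtain ⟨hlen, _hno1⟩ := hPre
  unfold Spec_findE findE findE_alt
  by_cases hn : 0 ≤ n
  · have hk : n = ((n.toNat : Nat) : Int) := by omega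
    have hkle : n.toNat ≤ primes.length := by omega
    rw [hk]
    have hφ := phiN_eq_prodF primes n.toNat hkle
    have hall : ∀ c : Int, (Int.gcd c (prodF (primes.take n.toNat)) = 1)
        ↔ (allCoprime primes ((n.toNat : Nat) : Int) c = true) := by
      intro c
      rw [allCoprime_eq_all primes n.toNat hkle c]
      exact gcd_prodF_eq_one_iff c _
    rw [hφ, fuelB_eq primes n.toNat hkle]
    exact loops_eq primes _ _ hφ hall _ 2
  · -- negative numOfPrimes: range is empty, phi = 1, both return 2
    have hr : PySem.List.pyRange 0 n 1 = [] :=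
      PySem.List.pyRange_one_eq_nil (by omega)
    have hφ : phiN primes n = some 1 := by simp [phiN, hr]
    have hf : fuelB primes n = 3 := by simp [fuelB, hr]
    have hall : ∀ c : Int, (Int.gcd c 1 = 1) ↔ (allCoprime primes n c = true) := by
      intro c; simp [allCoprime, hr, Int.gcd]
    rw [hφ, hf]
    exact loops_eq primes n 1 hφ hall 3 2
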